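-- pv_equiv track=rewrite | github.com/JohnTSpeare/anagrams | anagrams/anagrams.py | _expand_number_list
-- ===== SOURCE A (Python) =====
-- def _expand_number_list(number_lists):
--     if not number_lists:
--         return []
--     elif len(number_lists) == 1:
--         return [[num] for num in number_lists[0]]
--     expanded_number_list = []
--     expanded_sub_list = _expand_number_list(number_lists[1:])
--     for num in number_lists[0]:
--         for l in expanded_sub_list:
--             if not num in l:
--                 expanded_number_list.append([num] + l)
--     return expanded_number_list
-- ===== SOURCE B (Python) =====
-- def _expand_number_list(number_lists):
--     if not number_lists:
--         return []
--     result = [[x] for x in number_lists[0]]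
--     for lst in number_lists[1:]:
--         result = [p + [n] for p in result for n in lst if n not in p]
--     return result
-- ===== Notes on version B (the rewrite author's own statement) =====
-- stated objective: alternative
-- what changed: Replaces A's right-to-left recursion that prepends head elements to recursively expanded suffixes (nested appending loops) with an iterative left-to-right fold that rebuilds the whole prefix set each round as a single flat comprehension extending prefixes, avoiding recursion entirely.
import Mathlib
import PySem

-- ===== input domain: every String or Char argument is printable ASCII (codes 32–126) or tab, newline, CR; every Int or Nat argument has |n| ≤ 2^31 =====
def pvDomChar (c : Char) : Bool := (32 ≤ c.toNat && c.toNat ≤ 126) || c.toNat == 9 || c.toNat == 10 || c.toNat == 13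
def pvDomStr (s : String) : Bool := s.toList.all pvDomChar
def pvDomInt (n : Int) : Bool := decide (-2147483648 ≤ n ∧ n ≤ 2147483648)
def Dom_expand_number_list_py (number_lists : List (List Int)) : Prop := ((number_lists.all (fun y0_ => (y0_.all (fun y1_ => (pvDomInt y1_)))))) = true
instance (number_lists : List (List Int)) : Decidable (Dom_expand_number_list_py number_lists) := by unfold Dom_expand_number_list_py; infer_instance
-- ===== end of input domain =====

-- B replaces A's right-to-left recursion (prepending heads to nested appending loops over
-- expanded suffixes) with an iterative left-to-right fold that rebuilds the prefix set each
-- round as one flat comprehension; same values, an alternative decomposition.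

-- ===== PORT A =====
-- literal transliteration of A: empty guard, singleton base case, then a recursive call on the
-- tail and two nested loops appending [num] + l when num is not in l.
def expand_number_list_py (number_lists : List (List Int)) : List (List Int) :=
  match number_lists with
  | [] => []
  | [first] => first.map (fun num => [num])
  | first :: rest =>
    let expanded_sub_list := expand_number_list_py rest
    first.foldl (fun acc num =>
      expanded_sub_list.foldl (fun acc2 l =>
        if num ∈ l then acc2 else acc2 ++ [[num] ++ l]) acc) []

-- ===== PORT B =====
-- literal transliteration of Source B: start from singletons of the first list; each round replaces
-- result by the comprehension [p + [n] for p in result for n in lst if n not in p]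
-- (a comprehension ports as flatMap / filter / map in that loop structure).
def expand_number_list_py_alt (number_lists : List (List Int)) : List (List Int) :=
  match number_lists with
  | [] => []
  | first :: rest =>
    rest.foldl (fun result lst =>
        result.flatMap (fun p => (lst.filter (fun n => !p.contains n)).map (fun n => p ++ [n])))
      (first.map (fun x => [x]))

-- ===== PRECONDITION & SPEC =====
def Spec_expand_number_list_py (number_lists : List (List Int)) (out : List (List Int)) : Prop := out = expand_number_list_py_alt number_lists
instance (number_lists : List (List Int)) (out : List (List Int)) : Decidable (Spec_expand_number_list_py number_lists out) := by unfold Spec_expand_number_list_py; infer_instance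

-- ===== CLAIM (what is proved, stated in full; the proofs are below) =====
def Claim_equal_expand_number_list_py : Prop := ∀ (number_lists : List (List Int)), Dom_expand_number_list_py number_lists → Spec_expand_number_list_py number_lists (expand_number_list_py number_lists)

-- ===== LEMMAS AND PROOFS =====

-- proof-side reference enumeration: distinct tuples in A's (lexicographic) order
def crossA : List (List Int) → List (List Int)
  | [] => [[]]
  | xs :: rest =>
    xs.flatMap (fun n => ((crossA rest).filter (fun l => !l.contains n)).map (n :: ·))

-- proof-side: all extensions of prefix p by the remaining lists, avoiding elements of p
def crossRel : List (List Int) → List Int → List (List Int)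
  | [], p => [p]
  | lst :: rest, p =>
    (lst.filter (fun n => !p.contains n)).flatMap (fun n => crossRel rest (p ++ [n]))

theorem foldl_append_flat {α β : Type} (l : List α) (g : α → List β) (acc : List β) :
    l.foldl (fun a x => a ++ g x) acc = acc ++ l.flatMap g := by
  induction l generalizing acc with
  | nil => simp
  | cons x t ih => simp [List.foldl_cons, ih]

-- a membership-guarded appending loop is append-of-filtered-map (A's inner loop shape)
theorem foldl_mem_append {β : Type} (l : List (List Int)) (num : Int) (f : List Int → β)
    (acc : List β) :
    l.foldl (fun a x => if num ∈ x then a else a ++ [f x]) acc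
      = acc ++ ((l.filter (fun x => !x.contains num)).map f) := by
  induction l generalizing acc with
  | nil => simp
  | cons x t ih =>
    by_cases h : num ∈ x
    · simp [List.foldl_cons, ih, h]
    · simp [List.foldl_cons, ih, h]

theorem flatMap_filter {α β : Type} (l : List α) (q : α → Bool) (f : α → List β) :
    (l.filter q).flatMap f = l.flatMap (fun x => if q x then f x else []) := by
  induction l with
  | nil => simp
  | cons a t ih => by_cases h : q a <;> simp [h, ih]

-- A's nested loops compute a flatMap of filtered maps
theorem expA_loop (first : List Int) (sub : List (List Int)) :
    first.foldl (fun acc num =>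
        sub.foldl (fun acc2 l => if num ∈ l then acc2 else acc2 ++ [[num] ++ l]) acc) []
      = first.flatMap (fun n => ((sub.filter (fun l => !l.contains n)).map (n :: ·))) := by
  have hstep : (fun (acc : List (List Int)) (num : Int) =>
        sub.foldl (fun acc2 l => if num ∈ l then acc2 else acc2 ++ [[num] ++ l]) acc)
      = (fun acc num => acc ++ ((sub.filter (fun l => !l.contains num)).map (num :: ·))) := by
    funext acc num
    rw [foldl_mem_append sub num (fun l => [num] ++ l) acc]
    simp
  rw [hstep, foldl_append_flat]
  simp

-- characterize A
theorem expA_char : ∀ number_lists : List (List Int), number_lists ≠ [] →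
    expand_number_list_py number_lists = crossA number_lists := by
  intro nls
  induction nls with
  | nil => intro h; exact absurd rfl h
  | cons first rest ih =>
    intro _
    cases rest with
    | nil =>
      show first.map (fun num => [num]) = crossA [first]
      simp [crossA]
      induction first <;> simp_all
    | cons y t =>
      rw [show expand_number_list_py (first :: y :: t)
            = first.foldl (fun acc num =>
                (expand_number_list_py (y :: t)).foldl (fun acc2 l =>
                  if num ∈ l then acc2 else acc2 ++ [[num] ++ l]) acc) [] from rfl]
      rw [expA_loop, ih (by simp)]
      rfl

-- fold of B's comprehension rounds in terms of crossRel
theorem expB_fold : ∀ (lists : List (List Int)) (acc : List (List Int)),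
    lists.foldl (fun result lst =>
        result.flatMap (fun p =>
          (lst.filter (fun n => !p.contains n)).map (fun n => p ++ [n]))) acc
      = acc.flatMap (fun p => crossRel lists p) := by
  intro lists
  induction lists with
  | nil => intro acc; simp [crossRel]
  | cons lst rest ih =>
    intro acc
    rw [List.foldl_cons, ih, List.flatMap_assoc]
    apply List.flatMap_congr
    intro p _
    rw [List.flatMap_map]
    rfl

-- crossRel in terms of crossA: filter the suffix tuples avoiding p, prepend p
theorem crossRel_char : ∀ (lists : List (List Int)) (p : List Int),
    crossRel lists p
      = ((crossA lists).filter (fun t => t.all (fun x => !p.contains x))).map (p ++ ·) := by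
  intro lists
  induction lists with
  | nil => intro p; simp [crossRel, crossA]
  | cons lst rest ih =>
    intro p
    rw [show crossRel (lst :: rest) p
          = (lst.filter (fun n => !p.contains n)).flatMap (fun n => crossRel rest (p ++ [n]))
        from rfl,
        show crossA (lst :: rest)
          = lst.flatMap (fun n => ((crossA rest).filter (fun l => !l.contains n)).map (n :: ·))
        from rfl]
    rw [flatMap_filter, List.filter_flatMap, List.map_flatMap]
    apply List.flatMap_congr
    intro n _
    by_cases hn : p.contains n = true
    · have hmem : n ∈ p := List.contains_iff_mem.mp hn
      rw [if_neg (by simp [hmem])]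
      rw [List.filter_map]
      have hconst : ((fun t => t.all (fun x => !p.contains x)) ∘ (fun l => n :: l))
          = fun (_ : List Int) => false := by
        funext l; simp [hmem]
      rw [hconst]
      simp
    · have hn' : p.contains n = false := by simpa using hn
      have hnmem : n ∉ p := by simpa using hn'
      rw [if_pos (by simp [hnmem]), ih (p ++ [n])]
      rw [List.filter_map, List.map_map, List.filter_filter]
      congr 1
      · funext t
        simp [List.append_assoc]
      · apply List.filter_congr
        intro t _
        rw [Bool.eq_iff_iff]
        simp [List.all_eq_true, List.mem_append, hnmem]
        constructor
        · intro h; exact ⟨fun x hx => (h x hx).1, fun hc => (h n hc).2 rfl⟩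
        · rintro ⟨h1, h2⟩ x hx; exact ⟨h1 x hx, fun he => h2 (he ▸ hx)⟩

-- ===== VERDICT (by name: the statement is the Claim_ definition above) =====
theorem expand_number_list_py_spec : Claim_equal_expand_number_list_py := by
  intro nls _
  unfold Spec_expand_number_list_py
  cases nls with
  | nil => rfl
  | cons first rest =>
    rw [show expand_number_list_py_alt (first :: rest)
          = rest.foldl (fun result lst =>
              result.flatMap (fun p =>
                (lst.filter (fun n => !p.contains n)).map (fun n => p ++ [n])))
              (first.map (fun x => [x])) from rfl]
    rw [expB_fold]
    cases rest with
    | nil =>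
      show first.map (fun num => [num]) = _
      simp [crossRel]
    | cons y t =>
      rw [expA_char (first :: y :: t) (by simp),
          show crossA (first :: y :: t)
            = first.flatMap (fun n =>
                ((crossA (y :: t)).filter (fun l => !l.contains n)).map (n :: ·)) from rfl,
          List.flatMap_map]
      apply List.flatMap_congr
      intro x _
      rw [crossRel_char]
      congr 1
      apply List.filter_congr
      intro l _
      rw [Bool.eq_iff_iff]
      simp
      constructor
      · intro h z hz he; exact h (he ▸ hz)
      · intro h hx; exact h x hx rfl
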